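-- pv_equiv track=rewrite | github.com/simon-frijns/aoc-2020-py | day-12/code.py | process_action
-- ===== SOURCE A (Python) =====
-- from typing import Tuple
--
-- def process_action(order: str, xy: list, direction: int) -> Tuple[list, int]:
--     action = order[0]
--     value = int(order[1:])
--     directions = {0: 'N', 90: 'E', 180: 'S', 270: 'W'}
--     if action == 'F':
--         order = directions[direction] + str(value)
--         process_action(order, xy, direction)
--     match action:
--         case 'N':
--             xy[1] += value
--         case 'S':
--             xy[1] -= value
--         case 'W':
--             xy[0] -= value
--         case 'E':
--             xy[0] += value
--         case 'L':
--             direction = (direction - value) % 360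
--         case 'R':
--             direction = (direction + value) % 360
--     return xy, direction
-- ===== SOURCE B (Python) =====
-- # Table-driven, non-recursive rewrite: 'F' is resolved to its cardinal action by a
-- # direction table, position updates come from a delta table applied in place to xy
-- # (same in-place mutation of xy as the original), L/R stay modular arithmetic.
-- DIRECTIONS = {0: 'N', 90: 'E', 180: 'S', 270: 'W'}
-- DELTAS = {'N': (0, 1), 'S': (0, -1), 'W': (-1, 0), 'E': (1, 0)}
--
-- def process_action(order, xy, direction):
--     action = order[0]
--     value = int(order[1:])
--     if action == 'F':
--         action = DIRECTIONS[direction]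
--     delta = DELTAS.get(action)
--     if delta is not None:
--         dx, dy = delta
--         if dx:
--             xy[0] += dx * value
--         if dy:
--             xy[1] += dy * value
--     elif action == 'L':
--         direction = (direction - value) % 360
--     elif action == 'R':
--         direction = (direction + value) % 360
--     return xy, direction
-- ===== Notes on version B (the rewrite author's own statement) =====
-- stated objective: simpler
-- what changed: Replaced the recursive self-call for 'F' and the six-way match by a non-recursive table-driven update: 'F' is resolved to its cardinal action through a direction table, position changes come from a delta table applied in place, and L/R remain modular arithmetic.
import Mathlib
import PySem

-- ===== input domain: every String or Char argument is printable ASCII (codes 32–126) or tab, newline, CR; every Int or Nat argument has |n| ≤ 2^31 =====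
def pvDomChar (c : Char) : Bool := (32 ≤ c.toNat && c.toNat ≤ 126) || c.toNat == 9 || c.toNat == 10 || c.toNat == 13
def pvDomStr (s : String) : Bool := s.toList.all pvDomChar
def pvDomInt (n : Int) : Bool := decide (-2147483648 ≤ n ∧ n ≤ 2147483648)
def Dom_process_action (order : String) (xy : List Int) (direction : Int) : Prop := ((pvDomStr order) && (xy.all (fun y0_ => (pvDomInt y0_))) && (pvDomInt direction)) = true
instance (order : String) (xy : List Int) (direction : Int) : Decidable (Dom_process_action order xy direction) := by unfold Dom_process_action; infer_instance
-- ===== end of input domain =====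

-- B drops A's recursive self-call and six-way match for a table-driven single pass (objective: simpler).
-- Both Pythons mutate xy in place identically; the equivalence proved here is about the return value.

-- ===== PORT A =====
-- A's dict {0:'N',90:'E',180:'S',270:'W'} of one-character strings, values ported as Char
def pvDirections : PySem.Dict Int Char := PySem.Dict.ofList [(0, 'N'), (90, 'E'), (180, 'S'), (270, 'W')]

-- xy[i] += v  (i a literal nonnegative index in A's code)
def pvSetAdd (xy : List Int) (i : Nat) (v : Int) : List Int :=
  xy.set i (PySem.List.pyGetD xy (i : Int) 0 + v)

-- A's body; the fuel argument only makes A's self-recursion structural (one level is ever used: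
-- the rebuilt order starts with a cardinal letter, which never recurses again)
def pvAGo (fuel : Nat) (s : List Char) (xy : List Int) (direction : Int) : List Int × Int :=
  let action := (PySem.List.pyGet? s 0).getD ' '
  let value := (PySem.Int.ofChars? (PySem.List.slice s (some 1) none)).getD 0
  let xy1 :=
    if action = 'F' then
      match fuel with
      | f + 1 => (pvAGo f ((PySem.Dict.get? pvDirections direction).getD ' ' :: PySem.Int.toChars value) xy direction).1
      | 0 => xy
    else xy
  if action = 'N' then (pvSetAdd xy1 1 value, direction)
  else if action = 'S' then (pvSetAdd xy1 1 (-value), direction)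
  else if action = 'W' then (pvSetAdd xy1 0 (-value), direction)
  else if action = 'E' then (pvSetAdd xy1 0 value, direction)
  else if action = 'L' then (xy1, PySem.Int.mod (direction - value) 360)
  else if action = 'R' then (xy1, PySem.Int.mod (direction + value) 360)
  else (xy1, direction)
termination_by fuel

def process_action (order : String) (xy : List Int) (direction : Int) : List Int × Int :=
  pvAGo 1 order.toList xy direction

-- ===== PORT B =====
def pvDirectionsB : PySem.Dict Int Char := PySem.Dict.ofList [(0, 'N'), (90, 'E'), (180, 'S'), (270, 'W')]

def pvDeltas : PySem.Dict Char (Int × Int) :=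
  PySem.Dict.ofList [('N', (0, 1)), ('S', (0, -1)), ('W', (-1, 0)), ('E', (1, 0))]

def process_action_alt (order : String) (xy : List Int) (direction : Int) : List Int × Int :=
  let s := order.toList
  let action := (PySem.List.pyGet? s 0).getD ' '
  let value := (PySem.Int.ofChars? (PySem.List.slice s (some 1) none)).getD 0
  let action := if action = 'F' then (PySem.Dict.get? pvDirectionsB direction).getD ' ' else action
  match PySem.Dict.get? pvDeltas action with
  | some (dx, dy) =>
    let xy := if dx ≠ 0 then xy.set 0 (PySem.List.pyGetD xy 0 0 + dx * value) else xy
    let xy := if dy ≠ 0 then xy.set 1 (PySem.List.pyGetD xy 1 0 + dy * value) else xy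
    (xy, direction)
  | none =>
    if action = 'L' then (xy, PySem.Int.mod (direction - value) 360)
    else if action = 'R' then (xy, PySem.Int.mod (direction + value) 360)
    else (xy, direction)

-- ===== PRECONDITION & SPEC =====
-- Exactly the inputs on which the Python A returns: a non-empty order whose tail parses as an int,
-- xy long enough for the coordinate the action touches, and for 'F' a direction that is a key of
-- A's direction dict (otherwise Python raises IndexError / ValueError / KeyError).
def Pre_process_action (order : String) (xy : List Int) (direction : Int) : Prop :=
  order.toList ≠ [] ∧
  (PySem.Int.ofChars? order.toList.tail).isSome = true ∧
  ((order.toList.headD ' ' = 'N' ∨ order.toList.headD ' ' = 'S') → 2 ≤ xy.length) ∧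
  ((order.toList.headD ' ' = 'W' ∨ order.toList.headD ' ' = 'E') → 1 ≤ xy.length) ∧
  (order.toList.headD ' ' = 'F' →
     ((direction = 0 ∨ direction = 180) ∧ 2 ≤ xy.length) ∨
     ((direction = 90 ∨ direction = 270) ∧ 1 ≤ xy.length))
instance (order : String) (xy : List Int) (direction : Int) : Decidable (Pre_process_action order xy direction) := by
  unfold Pre_process_action; infer_instance

def pvWitness_process_action : String × List Int × Int := ("F10", [3, 4], 90)

def Spec_process_action (order : String) (xy : List Int) (direction : Int) (out : List Int × Int) : Prop := out = process_action_alt order xy direction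
instance (order : String) (xy : List Int) (direction : Int) (out : List Int × Int) : Decidable (Spec_process_action order xy direction out) := by unfold Spec_process_action; infer_instance

-- ===== CLAIM (what is proved, stated in full; the proofs are below) =====
def Claim_equal_process_action : Prop := ∀ (order : String) (xy : List Int) (direction : Int), Dom_process_action order xy direction → Pre_process_action order xy direction → Spec_process_action order xy direction (process_action order xy direction)


-- ===== LEMMAS AND PROOFS =====

-- reference form of Nat.toDigits 10 (most significant digit first)
def pvRefDigits (n : Nat) : List Char :=
  if h : n < 10 then [Nat.digitChar n]
  else pvRefDigits (n / 10) ++ [Nat.digitChar (n % 10)]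
termination_by n
decreasing_by exact Nat.div_lt_self (by omega) (by omega)

theorem pvRefDigits_big (n : Nat) (h : ¬ n < 10) :
    pvRefDigits n = pvRefDigits (n / 10) ++ [Nat.digitChar (n % 10)] := by
  rw [pvRefDigits]; simp [h]

theorem pvRefDigits_small (n : Nat) (h : n < 10) : pvRefDigits n = [Nat.digitChar n] := by
  rw [pvRefDigits]; simp [h]

theorem pvToDigitsCore_eq (f : Nat) : ∀ (n : Nat) (ds : List Char), n < f →
    Nat.toDigitsCore 10 f n ds = pvRefDigits n ++ ds := by
  induction f with
  | zero => intro n ds h; omega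
  | succ f ih =>
    intro n ds h
    by_cases h10 : n < 10
    · have hz : n / 10 = 0 := Nat.div_eq_of_lt h10
      simp [Nat.toDigitsCore, hz, pvRefDigits_small n h10, Nat.mod_eq_of_lt h10]
    · have hz : ¬ n / 10 = 0 := by
        have := Nat.div_pos (by omega : 10 ≤ n) (by norm_num)
        omega
      have hlt : n / 10 < f := by
        have := Nat.div_lt_self (by omega : 0 < n) (by norm_num : 1 < 10)
        omega
      simp only [Nat.toDigitsCore, hz, if_false]
      rw [ih (n / 10) _ hlt, pvRefDigits_big n h10, List.append_assoc]
      rfl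

theorem pvToDigits_eq (n : Nat) : Nat.toDigits 10 n = pvRefDigits n := by
  unfold Nat.toDigits
  rw [pvToDigitsCore_eq (n + 1) n [] (Nat.lt_succ_self n), List.append_nil]

-- the characters str(n) is made of: decimal digits, never sign/space/underscore
def pvGoodChar (c : Char) : Prop :=
  c.isDigit = true ∧ PySem.Int.isIntSpace c = false ∧ c ≠ '-' ∧ c ≠ '+' ∧ c ≠ '_'

theorem pvGood_digitChar (k : Nat) (_h : k < 10) : pvGoodChar (Nat.digitChar k) := by
  unfold pvGoodChar
  interval_cases k <;> refine ⟨by decide, by decide, by decide, by decide, by decide⟩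

theorem pvRefDigits_good (n : Nat) : ∀ c ∈ pvRefDigits n, pvGoodChar c := by
  induction n using pvRefDigits.induct with
  | case1 n h =>
    intro c hc
    rw [pvRefDigits_small n h] at hc
    simp at hc
    subst hc
    exact pvGood_digitChar n h
  | case2 n h ih =>
    intro c hc
    rw [pvRefDigits_big n h] at hc
    rcases List.mem_append.mp hc with hc | hc
    · exact ih c hc
    · simp at hc
      subst hc
      exact pvGood_digitChar _ (Nat.mod_lt _ (by norm_num))

theorem pvRefDigits_ne_nil (n : Nat) : pvRefDigits n ≠ [] := by
  rw [pvRefDigits]; split <;> simp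

def pvStep (a : Nat) (c : Char) : Nat := a * 10 + (c.toNat - '0'.toNat)

theorem pvDigitChar_toNat (k : Nat) (h : k < 10) :
    (Nat.digitChar k).toNat = k + 48 := by
  interval_cases k <;> decide

theorem pvFoldl_ref (n : Nat) : ∀ acc : Nat,
    (pvRefDigits n).foldl pvStep acc = acc * 10 ^ (pvRefDigits n).length + n := by
  induction n using pvRefDigits.induct with
  | case1 n h =>
    intro acc
    rw [pvRefDigits_small n h]
    simp only [List.foldl_cons, List.foldl_nil, List.length_cons, List.length_nil, pvStep]
    rw [pvDigitChar_toNat n h, show '0'.toNat = 48 from rfl]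
    have h1 : (10 : Nat) ^ (0 + 1) = 10 := by norm_num
    rw [h1]
    omega
  | case2 n h ih =>
    intro acc
    rw [pvRefDigits_big n h, List.foldl_append, ih acc]
    simp only [List.foldl_cons, List.foldl_nil, List.length_append, List.length_cons,
      List.length_nil, Nat.zero_add]
    unfold pvStep
    rw [pvDigitChar_toNat _ (Nat.mod_lt _ (by norm_num)), show '0'.toNat = 48 from rfl]
    have hpow : (10 : Nat) ^ ((pvRefDigits (n / 10)).length + 1) =
        10 ^ (pvRefDigits (n / 10)).length * 10 := pow_succ 10 _
    have hdm : 10 * (n / 10) + n % 10 = n := Nat.div_add_mod n 10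
    have hcancel : n % 10 + 48 - 48 = n % 10 := by omega
    rw [hpow, hcancel,
      show acc * (10 ^ (pvRefDigits (n / 10)).length * 10) =
        acc * 10 ^ (pvRefDigits (n / 10)).length * 10 from by ring]
    generalize acc * 10 ^ (pvRefDigits (n / 10)).length = P
    omega

-- reduces the stuck `Decidable.rec` that whnf leaves for `if b = true then ...`
theorem pvRec_eq_true {b : Bool} (hb : b = true) (f1 : ¬(b = true) → Option Nat)
    (f2 : (b = true) → Option Nat) :
    @Decidable.rec (b = true) (fun _ => Option Nat) f1 f2 (instDecidableEqBool b true) = f2 hb := by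
  subst hb; rfl

theorem pvStep_eq : ∀ (a : Nat) (x : Char), a * 10 + (x.toNat - '0'.toNat) = pvStep a x :=
  fun _ _ => rfl

-- shape of the goal left after reducing PySem.Int.ofChars? on a digit string
theorem pvOut (X : Option Nat) (F : Int → Int) (n : Nat) (v : Int)
    (hX : X = some n) (hF : F (n : Int) = v) :
    Option.map F (X >>= fun a => pure ((a : Nat) : Int)) = some v := by
  subst hX
  simp [hF]

theorem pvDropWhile_false {p : Char → Bool} : ∀ l : List Char, (∀ c ∈ l, p c = false) →
    List.dropWhile p l = l := by
  intro l h
  cases l with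
  | nil => rfl
  | cons a t => simp [h a (by simp)]

-- int(str(v)) == v
theorem pvRoundtrip (v : Int) : PySem.Int.ofChars? (PySem.Int.toChars v) = some v := by
  simp only [PySem.Int.toChars]
  split_ifs with hv
  · -- v < 0 : '-' :: digits of |v|
    obtain ⟨c, t, hct⟩ := List.exists_cons_of_ne_nil (pvRefDigits_ne_nil v.natAbs)
    have hgood : ∀ x ∈ pvRefDigits v.natAbs, pvGoodChar x := pvRefDigits_good v.natAbs
    have hnos : ∀ x ∈ '-' :: Nat.toDigits 10 v.natAbs, PySem.Int.isIntSpace x = false := by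
      intro x hx
      rcases List.mem_cons.mp hx with hx | hx
      · subst hx; decide
      · rw [pvToDigits_eq] at hx; exact (hgood x hx).2.1
    simp only [PySem.Int.ofChars?]
    have h1 : List.dropWhile PySem.Int.isIntSpace ('-' :: Nat.toDigits 10 v.natAbs) =
        '-' :: Nat.toDigits 10 v.natAbs := pvDropWhile_false _ hnos
    rw [h1]
    have h2 : List.dropWhile PySem.Int.isIntSpace ('-' :: Nat.toDigits 10 v.natAbs).reverse =
        ('-' :: Nat.toDigits 10 v.natAbs).reverse :=
      pvDropWhile_false _ (fun x hx => hnos x (List.mem_reverse.mp hx))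
    rw [h2, List.reverse_reverse, pvToDigits_eq, hct]
    have hgood2 : ∀ x ∈ c :: t, pvGoodChar x := by
      intro x hx; exact hgood x (by rw [hct]; exact hx)
    split
    · rename_i ds heq
      have hds : c :: t = ds := List.tail_eq_of_cons_eq heq
      subst hds
      refine pvOut _ _ v.natAbs v ?_ (by omega)
      -- remaining: the private digit parser on c :: t returns |v|
      have hfold : v.natAbs = List.foldl pvStep (pvStep 0 c) t := by
        have h0 := pvFoldl_ref v.natAbs 0
        rw [hct] at h0
        simp only [List.foldl_cons] at h0
        simpa using h0.symm
      have hc : c.isDigit = true := (hgood2 c (by simp)).1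
      have hdt : ∀ x ∈ t, x.isDigit = true := fun x hx => (hgood2 x (by simp [hx])).1
      conv_lhs => whnf
      rw [pvRec_eq_true hc]
      conv_lhs => whnf
      rw [hfold, pvStep_eq]
      generalize pvStep 0 c = acc
      clear hfold hc hgood2 hct hgood h1 h2 hnos heq
      revert hdt
      induction t generalizing acc with
      | nil =>
        intro _
        conv_lhs => whnf
        simp
      | cons d t' ih =>
        intro hdt
        have hd : d.isDigit = true := hdt d (by simp)
        conv_lhs => whnf
        rw [pvRec_eq_true hd]
        conv_lhs => whnf
        rw [pvStep_eq, List.foldl_cons]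
        exact ih (pvStep acc d) (fun x hx => hdt x (by simp [hx]))
    · rename_i ds heq
      exact absurd (List.head_eq_of_cons_eq heq) (by decide)
    · rename_i hn1 hn2
      exact absurd rfl (hn1 (c :: t))
  · -- 0 ≤ v : digits of v.toNat
    obtain ⟨c, t, hct⟩ := List.exists_cons_of_ne_nil (pvRefDigits_ne_nil v.toNat)
    have hgood : ∀ x ∈ pvRefDigits v.toNat, pvGoodChar x := pvRefDigits_good v.toNat
    have hnos : ∀ x ∈ Nat.toDigits 10 v.toNat, PySem.Int.isIntSpace x = false := by
      intro x hx
      rw [pvToDigits_eq] at hx; exact (hgood x hx).2.1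
    simp only [PySem.Int.ofChars?]
    have h1 : List.dropWhile PySem.Int.isIntSpace (Nat.toDigits 10 v.toNat) =
        Nat.toDigits 10 v.toNat := pvDropWhile_false _ hnos
    rw [h1]
    have h2 : List.dropWhile PySem.Int.isIntSpace (Nat.toDigits 10 v.toNat).reverse =
        (Nat.toDigits 10 v.toNat).reverse :=
      pvDropWhile_false _ (fun x hx => hnos x (List.mem_reverse.mp hx))
    rw [h2, List.reverse_reverse, pvToDigits_eq, hct]
    have hcg : pvGoodChar c := hgood c (by rw [hct]; simp)
    have hgood2 : ∀ x ∈ c :: t, pvGoodChar x := by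
      intro x hx; exact hgood x (by rw [hct]; exact hx)
    split
    · rename_i ds heq
      exact absurd (List.head_eq_of_cons_eq heq) hcg.2.2.1
    · rename_i ds heq
      exact absurd (List.head_eq_of_cons_eq heq) hcg.2.2.2.1
    · rename_i hn1 hn2
      clear hn1 hn2
      refine pvOut _ _ v.toNat v ?_ (by omega)
      have hfold : v.toNat = List.foldl pvStep (pvStep 0 c) t := by
        have h0 := pvFoldl_ref v.toNat 0
        rw [hct] at h0
        simp only [List.foldl_cons] at h0
        simpa using h0.symm
      have hc : c.isDigit = true := hcg.1
      have hdt : ∀ x ∈ t, x.isDigit = true := fun x hx => (hgood2 x (by simp [hx])).1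
      conv_lhs => whnf
      rw [pvRec_eq_true hc]
      conv_lhs => whnf
      rw [hfold, pvStep_eq]
      generalize pvStep 0 c = acc
      clear hfold hc hcg hgood2 hct hgood h1 h2 hnos
      revert hdt
      induction t generalizing acc with
      | nil =>
        intro _
        conv_lhs => whnf
        simp
      | cons d t' ih =>
        intro hdt
        have hd : d.isDigit = true := hdt d (by simp)
        conv_lhs => whnf
        rw [pvRec_eq_true hd]
        conv_lhs => whnf
        rw [pvStep_eq, List.foldl_cons]
        exact ih (pvStep acc d) (fun x hx => hdt x (by simp [hx]))

-- value of A's direction dict at its four keys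
theorem pvDir0 : (PySem.Dict.get? pvDirections 0).getD ' ' = 'N' := by decide
theorem pvDir90 : (PySem.Dict.get? pvDirections 90).getD ' ' = 'E' := by decide
theorem pvDir180 : (PySem.Dict.get? pvDirections 180).getD ' ' = 'S' := by decide
theorem pvDir270 : (PySem.Dict.get? pvDirections 270).getD ' ' = 'W' := by decide
theorem pvDirB0 : (PySem.Dict.get? pvDirectionsB 0).getD ' ' = 'N' := by decide
theorem pvDirB90 : (PySem.Dict.get? pvDirectionsB 90).getD ' ' = 'E' := by decide
theorem pvDirB180 : (PySem.Dict.get? pvDirectionsB 180).getD ' ' = 'S' := by decide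
theorem pvDirB270 : (PySem.Dict.get? pvDirectionsB 270).getD ' ' = 'W' := by decide

theorem pvDeltas_eq_mk :
    pvDeltas = PySem.Dict.mk [('N', ((0 : Int), (1 : Int))), ('S', (0, -1)), ('W', (-1, 0)), ('E', (1, 0))] := by
  decide

theorem pvDeltas_none (a : Char) (hN : a ≠ 'N') (hS : a ≠ 'S') (hW : a ≠ 'W') (hE : a ≠ 'E') :
    PySem.Dict.get? pvDeltas a = none := by
  rw [pvDeltas_eq_mk]
  simp only [PySem.Dict.get?_mk_cons]
  rw [if_neg (by simp [Ne.symm hN]), if_neg (by simp [Ne.symm hS]),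
      if_neg (by simp [Ne.symm hW]), if_neg (by simp [Ne.symm hE])]
  rfl

-- B evaluated at a resolved cardinal action
theorem pvAlt_eval (order : String) (xy : List Int) (direction : Int) (a : Char) (rest : List Char)
    (v : Int) (hor : order.toList = a :: rest) (hv : PySem.Int.ofChars? rest = some v) :
    process_action_alt order xy direction =
      (let action := if a = 'F' then (PySem.Dict.get? pvDirectionsB direction).getD ' ' else a
       match PySem.Dict.get? pvDeltas action with
       | some (dx, dy) =>
         let xy := if dx ≠ 0 then xy.set 0 (PySem.List.pyGetD xy 0 0 + dx * v) else xy
         let xy := if dy ≠ 0 then xy.set 1 (PySem.List.pyGetD xy 1 0 + dy * v) else xy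
         (xy, direction)
       | none =>
         if action = 'L' then (xy, PySem.Int.mod (direction - v) 360)
         else if action = 'R' then (xy, PySem.Int.mod (direction + v) 360)
         else (xy, direction)) := by
  unfold process_action_alt
  rw [hor]
  simp [PySem.List.slice_from_one, hv]

-- A's inner (recursive) call on a rebuilt cardinal order
theorem pvAGo_cardinal (c : Char) (v : Int) (xy : List Int) (direction : Int)
    (hc : c = 'N' ∨ c = 'E' ∨ c = 'S' ∨ c = 'W') :
    pvAGo 0 (c :: PySem.Int.toChars v) xy direction =
      (if c = 'N' then pvSetAdd xy 1 v
       else if c = 'S' then pvSetAdd xy 1 (-v)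
       else if c = 'W' then pvSetAdd xy 0 (-v)
       else pvSetAdd xy 0 v, direction) := by
  rw [pvAGo]
  simp only [PySem.List.pyGet?_zero_cons, Option.getD_some, PySem.List.slice_from_one,
    List.tail_cons, pvRoundtrip, Option.getD_some]
  rcases hc with h | h | h | h <;> subst h <;> simp

-- ===== VERDICT (by name: the statement is the Claim_ definition above) =====
theorem process_action_spec : Claim_equal_process_action := by
  intro order xy direction _hdom hpre
  obtain ⟨hne, hsome, _, _, hF⟩ := hpre
  unfold Spec_process_action
  obtain ⟨a, rest, hor⟩ := List.exists_cons_of_ne_nil hne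
  rw [hor] at hsome hF
  simp only [List.tail_cons] at hsome
  simp only [List.headD_cons] at hF
  obtain ⟨v, hv⟩ := Option.isSome_iff_exists.mp hsome
  rw [pvAlt_eval order xy direction a rest v hor hv]
  unfold process_action
  rw [hor, pvAGo]
  simp only [PySem.List.pyGet?_zero_cons, Option.getD_some, PySem.List.slice_from_one,
    List.tail_cons, hv]
  by_cases haF : a = 'F'
  · subst haF
    simp only [if_true]
    rcases hF rfl with ⟨hd, _⟩ | ⟨hd, _⟩ <;> rcases hd with hd | hd <;> subst hd
    · rw [pvDir0, pvAGo_cardinal 'N' v xy 0 (by simp)]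
      rw [pvDirB0]
      simp [pvSetAdd, pvDeltas_eq_mk, PySem.Dict.get?_mk_cons]
    · rw [pvDir180, pvAGo_cardinal 'S' v xy 180 (by simp)]
      rw [pvDirB180]
      simp [pvSetAdd, pvDeltas_eq_mk, PySem.Dict.get?_mk_cons]
    · rw [pvDir90, pvAGo_cardinal 'E' v xy 90 (by simp)]
      rw [pvDirB90]
      simp [pvSetAdd, pvDeltas_eq_mk, PySem.Dict.get?_mk_cons]
    · rw [pvDir270, pvAGo_cardinal 'W' v xy 270 (by simp)]
      rw [pvDirB270]
      simp [pvSetAdd, pvDeltas_eq_mk, PySem.Dict.get?_mk_cons]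
  · simp only [if_neg haF]
    by_cases haN : a = 'N'
    · subst haN; simp [pvSetAdd, pvDeltas_eq_mk, PySem.Dict.get?_mk_cons]
    by_cases haS : a = 'S'
    · subst haS; simp [pvSetAdd, pvDeltas_eq_mk, PySem.Dict.get?_mk_cons]
    by_cases haW : a = 'W'
    · subst haW; simp [pvSetAdd, pvDeltas_eq_mk, PySem.Dict.get?_mk_cons]
    by_cases haE : a = 'E'
    · subst haE; simp [pvSetAdd, pvDeltas_eq_mk, PySem.Dict.get?_mk_cons]
    rw [pvDeltas_none a haN haS haW haE]
    by_cases haL : a = 'L'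
    · subst haL; simp
    by_cases haR : a = 'R'
    · subst haR; simp [haL]
    simp [haN, haS, haW, haE, haL, haR]
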